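-- pv_equiv track=rewrite | github.com/Zeuyel/stata18-toolkit | delivery/archpkg/stata18-runtime/stata18-license-builder.py | encode_payload
-- ===== SOURCE A (Python) =====
-- ALPH = "0123456789abcdefghijklmnopqrstuvwxyz$"
--
-- MOD = 37
--
-- def to_digits(text: str) -> list[int]:
--     out: list[int] = []
--     for ch in text:
--         if "0" <= ch <= "9":
--             out.append(ord(ch) - 48)
--         elif "a" <= ch <= "z":
--             out.append(ord(ch) - 87)
--         elif "A" <= ch <= "Z":
--             out.append(ord(ch) - 55)
--         elif ch == "$":
--             out.append(36)
--         else: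
--             raise ValueError(f"unsupported character: {ch!r}")
--     return out
--
-- def from_digits(values: list[int]) -> str:
--     return "".join(ALPH[v] for v in values)
--
-- def encode_payload(payload: str) -> str:
--     prefix = to_digits(payload)
--     checks = [
--         sum(prefix) % MOD,
--         sum(prefix[i] for i in range(len(prefix)) if i & 1) % MOD,
--         sum(prefix[i] for i in range(len(prefix)) if not (i & 1)) % MOD,
--     ]
--     y = prefix + checks
--     partials: list[int] = []
--     acc = 0
--     for value in y:
--         acc = (acc + value) % MOD
--         partials.append(acc)
--
--     encoded = [0] * len(y)
--     encoded[-1] = partials[-1]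
--     for i in range(len(y) - 2, -1, -1):
--         encoded[i] = (partials[i] + encoded[i + 1]) % MOD
--     return from_digits(encoded)
-- ===== SOURCE B (Python) =====
-- ALPH = "0123456789abcdefghijklmnopqrstuvwxyz$"
--
-- MOD = 37
--
-- def encode_payload(payload: str) -> str:
--     # one forward pass: digits + total / odd-index / even-index sums
--     digits = []
--     total = odd = even = 0
--     for i, ch in enumerate(payload):
--         if "0" <= ch <= "9":
--             d = ord(ch) - 48
--         elif "a" <= ch <= "z":
--             d = ord(ch) - 87
--         elif "A" <= ch <= "Z":
--             d = ord(ch) - 55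
--         elif ch == "$":
--             d = 36
--         else:
--             raise ValueError(f"unsupported character: {ch!r}")
--         digits.append(d)
--         total += d
--         if i & 1:
--             odd += d
--         else:
--             even += d
--     y = digits + [total % MOD, odd % MOD, even % MOD]
--     # one backward pass: p recovers each prefix sum mod MOD, acc is the suffix sum
--     p = (total + total % MOD + odd % MOD + even % MOD) % MOD
--     acc = p
--     out = [ALPH[p]]
--     for i in range(len(y) - 2, -1, -1):
--         p = (p - y[i + 1]) % MOD
--         acc = (acc + p) % MOD
--         out.append(ALPH[acc])
--     return "".join(reversed(out))
-- ===== Notes on version B (the rewrite author's own statement) =====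
-- stated objective: alternative
-- what changed: B computes the three checksums in the same single forward pass that converts characters to digits, then builds the encoded string in one backward pass that recovers each mod-37 prefix sum by subtraction (p = (p - y[i+1]) % 37) instead of materialising the partials list and the separate encoded array.
import Mathlib
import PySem

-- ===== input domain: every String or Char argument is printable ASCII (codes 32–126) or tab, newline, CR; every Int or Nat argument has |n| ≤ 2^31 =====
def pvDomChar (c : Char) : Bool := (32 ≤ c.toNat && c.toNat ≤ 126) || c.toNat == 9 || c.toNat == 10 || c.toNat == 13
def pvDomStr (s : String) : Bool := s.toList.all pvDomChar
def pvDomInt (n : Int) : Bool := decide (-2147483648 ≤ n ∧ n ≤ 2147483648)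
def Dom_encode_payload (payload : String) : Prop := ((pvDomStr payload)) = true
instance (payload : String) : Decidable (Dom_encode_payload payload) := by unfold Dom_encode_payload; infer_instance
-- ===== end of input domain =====

-- B computes the three checksums in the digit-conversion pass and builds the encoded
-- string in one backward pass that recovers each prefix sum by mod-37 subtraction,
-- avoiding A's partials list and encoded array (objective: alternative decomposition).

-- shared alphabet and the per-character digit classification (identical if-chain in both Pythons)
def pvALPH : List Char := "0123456789abcdefghijklmnopqrstuvwxyz$".toList

def pvAlphGet (v : Int) : Char := PySem.List.pyGetD pvALPH v ' '  -- ALPH[v]; v is always in range here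

def pvDigOf (c : Char) : Int :=
  if '0' ≤ c ∧ c ≤ '9' then (c.toNat : Int) - 48
  else if 'a' ≤ c ∧ c ≤ 'z' then (c.toNat : Int) - 87
  else if 'A' ≤ c ∧ c ≤ 'Z' then (c.toNat : Int) - 55
  else if c = '$' then 36
  else 0  -- Python raises ValueError here; excluded by Pre_encode_payload

-- ===== PORT A =====
def pvToDigitsA : List Char → List Int
  | [] => []
  | c :: r => pvDigOf c :: pvToDigitsA r

def pvOddSumA (l : List Int) : Int :=
  (List.range l.length).foldl (fun s i => if i &&& 1 ≠ 0 then s + l.getD i 0 else s) 0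

def pvEvenSumA (l : List Int) : Int :=
  (List.range l.length).foldl (fun s i => if i &&& 1 = 0 then s + l.getD i 0 else s) 0

def pvPartialsA (y : List Int) : List Int :=
  (y.foldl (fun pr v =>
      let a := PySem.Int.mod (pr.2 + v) 37
      (pr.1 ++ [a], a)) (([] : List Int), (0 : Int))).1

-- the backward fill encoded[i] = (partials[i] + encoded[i+1]) % 37, encoded[-1] = partials[-1]
def pvEncA : List Int → List Int
  | [] => []
  | [p] => [p]
  | p :: q :: r =>
      let e := pvEncA (q :: r)
      PySem.Int.mod (p + e.headI) 37 :: e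

def pvFromDigits (vals : List Int) : String := String.ofList (vals.map pvAlphGet)

def encode_payload (payload : String) : String :=
  let pfx := pvToDigitsA payload.toList
  let checks := [PySem.Int.mod pfx.sum 37, PySem.Int.mod (pvOddSumA pfx) 37,
                 PySem.Int.mod (pvEvenSumA pfx) 37]
  let y := pfx ++ checks
  pvFromDigits (pvEncA (pvPartialsA y))

-- ===== PORT B =====
-- one forward pass: digits list, total, odd-index sum, even-index sum
def pvBPass (l : List Char) : List Int × Int × Int × Int :=
  (PySem.List.enumerate l 0).foldl
    (fun st p =>
      let d := pvDigOf p.2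
      (st.1 ++ [d], st.2.1 + d,
       (if PySem.Int.band p.1 1 ≠ 0 then st.2.2.1 + d else st.2.2.1),
       (if PySem.Int.band p.1 1 ≠ 0 then st.2.2.2 else st.2.2.2 + d)))
    (([] : List Int), (0 : Int), (0 : Int), (0 : Int))

-- Source B's loop `for i in range(len(y)-2, -1, -1)` runs back to front: the recursive call
-- computes the suffix (all later iterations) first; state (out, p, acc)
def pvBGo : List Int → Int → List Char × Int × Int
  | [], S => ([], S, S)
  | [_], S => ([pvAlphGet S], S, S)
  | _ :: w :: r, S =>
      let pr := pvBGo (w :: r) S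
      let p' := PySem.Int.mod (pr.2.1 - w) 37
      let a' := PySem.Int.mod (pr.2.2 + p') 37
      (pvAlphGet a' :: pr.1, p', a')

def encode_payload_alt (payload : String) : String :=
  let st := pvBPass payload.toList
  let t := st.2.1
  let o := st.2.2.1
  let e := st.2.2.2
  let y := st.1 ++ [PySem.Int.mod t 37, PySem.Int.mod o 37, PySem.Int.mod e 37]
  let S := PySem.Int.mod (t + PySem.Int.mod t 37 + PySem.Int.mod o 37 + PySem.Int.mod e 37) 37
  String.ofList (pvBGo y S).1

-- ===== PRECONDITION & SPEC =====
-- Pre_ excludes payloads containing a character outside 0-9/a-z/A-Z/$, on which both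
-- Pythons raise ValueError.
def pvOkChar (c : Char) : Bool :=
  ('0' ≤ c && c ≤ '9') || ('a' ≤ c && c ≤ 'z') || ('A' ≤ c && c ≤ 'Z') || c == '$'

def Pre_encode_payload (payload : String) : Prop := (payload.toList.all pvOkChar) = true
instance (payload : String) : Decidable (Pre_encode_payload payload) := by
  unfold Pre_encode_payload; infer_instance

def pvWitness_encode_payload : String := "Abc9$"

def Spec_encode_payload (payload : String) (out : String) : Prop := out = encode_payload_alt payload
instance (payload : String) (out : String) : Decidable (Spec_encode_payload payload out) := by
  unfold Spec_encode_payload; infer_instance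

-- ===== CLAIM (what is proved, stated in full; the proofs are below) =====
def Claim_equal_encode_payload : Prop :=
  ∀ (payload : String), Dom_encode_payload payload → Pre_encode_payload payload →
    Spec_encode_payload payload (encode_payload payload)

-- ===== LEMMAS AND PROOFS =====

-- structural form of A's partials loop (carry = previous stored value)
def pvP : List Int → Int → List Int
  | [], _ => []
  | v :: r, c => PySem.Int.mod (c + v) 37 :: pvP r (PySem.Int.mod (c + v) 37)

-- structural index-parity sums
def pvOddS : List Int → Int → Int
  | [], _ => 0
  | d :: r, i => (if PySem.Int.band i 1 ≠ 0 then d else 0) + pvOddS r (i + 1)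

def pvEvenS : List Int → Int → Int
  | [], _ => 0
  | d :: r, i => (if PySem.Int.band i 1 ≠ 0 then 0 else d) + pvEvenS r (i + 1)

theorem pvMod37 (a : Int) : PySem.Int.mod a 37 = a % 37 :=
  PySem.Int.mod_eq_emod_of_pos (by omega)

theorem pvP_carry (r : List Int) (c : Int) : pvP r (PySem.Int.mod c 37) = pvP r c := by
  cases r with
  | nil => rfl
  | cons v t =>
      have h : PySem.Int.mod (PySem.Int.mod c 37 + v) 37 = PySem.Int.mod (c + v) 37 := by
        simp only [pvMod37]; omega
      simp [pvP]

theorem pvPartialsA_fold (y : List Int) : ∀ (pre : List Int) (acc : Int),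
    (y.foldl (fun pr v =>
        let a := PySem.Int.mod (pr.2 + v) 37
        (pr.1 ++ [a], a)) (pre, acc)).1 = pre ++ pvP y acc := by
  induction y with
  | nil => intro pre acc; simp [pvP]
  | cons v r ih =>
      intro pre acc
      simp only [List.foldl_cons]
      have h := ih (pre ++ [PySem.Int.mod (acc + v) 37]) (PySem.Int.mod (acc + v) 37)
      simpa [pvP, List.append_assoc] using h

theorem pvPartialsA_eq (y : List Int) : pvPartialsA y = pvP y 0 := by
  simpa [pvPartialsA] using pvPartialsA_fold y [] 0

theorem pvBPass_fold (l : List Char) : ∀ (i : Nat) (ds : List Int) (t o e : Int),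
    (PySem.List.enumerate l (i : Int)).foldl
      (fun st p =>
        let d := pvDigOf p.2
        (st.1 ++ [d], st.2.1 + d,
         (if PySem.Int.band p.1 1 ≠ 0 then st.2.2.1 + d else st.2.2.1),
         (if PySem.Int.band p.1 1 ≠ 0 then st.2.2.2 else st.2.2.2 + d)))
      (ds, t, o, e)
    = (ds ++ pvToDigitsA l, t + (pvToDigitsA l).sum,
       o + pvOddS (pvToDigitsA l) (i : Int), e + pvEvenS (pvToDigitsA l) (i : Int)) := by
  induction l with
  | nil => intro i ds t o e; simp [pvToDigitsA, pvOddS, pvEvenS, PySem.List.enumerate_nil]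
  | cons c r ih =>
      intro i ds t o e
      have hcast : ((i : Int) + 1) = ((i + 1 : Nat) : Int) := by push_cast; ring
      simp only [PySem.List.enumerate_cons, List.foldl_cons, hcast]
      rw [ih (i + 1)]
      simp only [pvToDigitsA, pvOddS, pvEvenS, List.sum_cons, Prod.mk.injEq]
      refine ⟨by simp, by ring, ?_, ?_⟩ <;>
        · rw [hcast]
          split_ifs <;> ring

theorem pvBPass_eq (l : List Char) :
    pvBPass l = (pvToDigitsA l, (pvToDigitsA l).sum, pvOddS (pvToDigitsA l) 0,
                 pvEvenS (pvToDigitsA l) 0) := by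
  have := pvBPass_fold l 0 [] 0 0 0
  simpa [pvBPass] using this

theorem pvOddSumA_fold (t : List Int) : ∀ (L : List Int) (off : Nat) (s : Int),
    L.drop off = t →
    (List.range' off t.length).foldl (fun s i => if i &&& 1 ≠ 0 then s + L.getD i 0 else s) s
      = s + pvOddS t (off : Int) := by
  induction t with
  | nil => intro L off s h; simp [pvOddS]
  | cons d r ih =>
      intro L off s h
      have hget : L.getD off 0 = d := by
        have h0 : (L.drop off)[0]? = some d := by rw [h]; rfl
        rw [List.getElem?_drop] at h0
        simp only [Nat.add_zero] at h0
        simp [List.getD_eq_getElem?_getD, h0]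
      have hdrop : L.drop (off + 1) = r := by
        have h1 := congrArg (List.drop 1) h
        simpa [List.drop_drop, Nat.add_comm] using h1
      have hb : PySem.Int.band (off : Int) 1 = ((off &&& 1 : Nat) : Int) := by
        exact_mod_cast PySem.Int.band_natCast off 1
      rw [show (d :: r).length = r.length + 1 from rfl, List.range'_succ, List.foldl_cons,
          ih L (off + 1) _ hdrop]
      simp only [pvOddS, hb, hget]
      have hc : ((off : Int) + 1) = ((off + 1 : Nat) : Int) := by push_cast; ring
      rw [hc]
      by_cases hp : off &&& 1 = 0
      · rw [if_neg (by simp [hp]), if_neg (by simp [hp])]; ring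
      · rw [if_pos hp, if_pos (Int.natCast_ne_zero.mpr hp)]; ring

theorem pvEvenSumA_fold (t : List Int) : ∀ (L : List Int) (off : Nat) (s : Int),
    L.drop off = t →
    (List.range' off t.length).foldl (fun s i => if i &&& 1 = 0 then s + L.getD i 0 else s) s
      = s + pvEvenS t (off : Int) := by
  induction t with
  | nil => intro L off s h; simp [pvEvenS]
  | cons d r ih =>
      intro L off s h
      have hget : L.getD off 0 = d := by
        have h0 : (L.drop off)[0]? = some d := by rw [h]; rfl
        rw [List.getElem?_drop] at h0
        simp only [Nat.add_zero] at h0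
        simp [List.getD_eq_getElem?_getD, h0]
      have hdrop : L.drop (off + 1) = r := by
        have h1 := congrArg (List.drop 1) h
        simpa [List.drop_drop, Nat.add_comm] using h1
      have hb : PySem.Int.band (off : Int) 1 = ((off &&& 1 : Nat) : Int) := by
        exact_mod_cast PySem.Int.band_natCast off 1
      rw [show (d :: r).length = r.length + 1 from rfl, List.range'_succ, List.foldl_cons,
          ih L (off + 1) _ hdrop]
      simp only [pvEvenS, hb, hget]
      have hc : ((off : Int) + 1) = ((off + 1 : Nat) : Int) := by push_cast; ring
      rw [hc]
      by_cases hp : off &&& 1 = 0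
      · rw [if_pos hp, if_neg (by simp [hp])]; ring
      · rw [if_neg hp, if_pos (Int.natCast_ne_zero.mpr hp)]; ring

theorem pvOddSumA_eq (l : List Int) : pvOddSumA l = pvOddS l 0 := by
  have := pvOddSumA_fold l l 0 0 (by simp)
  simpa [pvOddSumA, List.range_eq_range'] using this

theorem pvEvenSumA_eq (l : List Int) : pvEvenSumA l = pvEvenS l 0 := by
  have := pvEvenSumA_fold l l 0 0 (by simp)
  simpa [pvEvenSumA, List.range_eq_range'] using this

theorem pvBGo_spec : ∀ (z : List Int) (c S : Int), z ≠ [] →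
    S = PySem.Int.mod (c + z.sum) 37 →
    pvBGo z S = ((pvEncA (pvP z c)).map pvAlphGet, (pvP z c).headI,
                 (pvEncA (pvP z c)).headI) := by
  intro z
  induction z with
  | nil => intro c S h _; exact absurd rfl h
  | cons v r ih =>
      intro c S _ hS
      cases r with
      | nil =>
          have hSv : S = PySem.Int.mod (c + v) 37 := by simpa using hS
          simp [pvBGo, pvP, pvEncA, hSv]
      | cons w t =>
          have hsum : c + (v :: w :: t).sum = (c + v) + (w :: t).sum := by
            simp [List.sum_cons]; ring
          have hr := ih (c + v) S (by simp) (by rw [hS, hsum])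
          have hP : pvP (v :: w :: t) c
              = PySem.Int.mod (c + v) 37 :: pvP (w :: t) (c + v) := by
            have h1 : pvP (v :: w :: t) c
                = PySem.Int.mod (c + v) 37 :: pvP (w :: t) (PySem.Int.mod (c + v) 37) := rfl
            rw [h1, pvP_carry]
          have hB : pvBGo (v :: w :: t) S
              = (pvAlphGet (PySem.Int.mod ((pvBGo (w :: t) S).2.2
                    + PySem.Int.mod ((pvBGo (w :: t) S).2.1 - w) 37) 37)
                  :: (pvBGo (w :: t) S).1,
                 PySem.Int.mod ((pvBGo (w :: t) S).2.1 - w) 37,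
                 PySem.Int.mod ((pvBGo (w :: t) S).2.2
                    + PySem.Int.mod ((pvBGo (w :: t) S).2.1 - w) 37) 37) := rfl
          have hPh : (pvP (w :: t) (c + v)).headI = PySem.Int.mod (c + v + w) 37 := rfl
          have hp' : PySem.Int.mod ((pvP (w :: t) (c + v)).headI - w) 37
              = PySem.Int.mod (c + v) 37 := by
            rw [hPh]; simp only [pvMod37]; omega
          obtain ⟨m, q, hq⟩ : ∃ m q, pvP (w :: t) (c + v) = m :: q := ⟨_, _, rfl⟩
          have hE : pvEncA (pvP (v :: w :: t) c)
              = PySem.Int.mod (PySem.Int.mod (c + v) 37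
                  + (pvEncA (pvP (w :: t) (c + v))).headI) 37
                :: pvEncA (pvP (w :: t) (c + v)) := by
            rw [hP, hq]; rfl
          rw [hB, hr, hE]
          simp only [hp', List.map_cons, List.headI_cons, Prod.mk.injEq]
          refine ⟨?_, rfl, ?_⟩ <;> rw [Int.add_comm]

-- ===== VERDICT (by name: the statement is the Claim_ definition above) =====
theorem encode_payload_spec : Claim_equal_encode_payload := by
  intro payload _ _
  unfold Spec_encode_payload encode_payload encode_payload_alt
  simp only [pvBPass_eq, pvOddSumA_eq, pvEvenSumA_eq, pvPartialsA_eq]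
  set D := pvToDigitsA payload.toList with hD
  set y := D ++ [PySem.Int.mod D.sum 37, PySem.Int.mod (pvOddS D 0) 37,
                 PySem.Int.mod (pvEvenS D 0) 37] with hy
  have hS : PySem.Int.mod (D.sum + PySem.Int.mod D.sum 37 + PySem.Int.mod (pvOddS D 0) 37
        + PySem.Int.mod (pvEvenS D 0) 37) 37 = PySem.Int.mod (0 + y.sum) 37 := by
    congr 1
    simp [hy, List.sum_append, List.sum_cons]
    ring
  rw [hS, pvBGo_spec y 0 _ (by simp [hy]) rfl]
  simp [pvFromDigits]
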